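-- pv_equiv track=rewrite | github.com/nerdylua/MumbaiHacks | Backend/app/services/preprocessors/Markdown_chunker.py | _find_page_segment
-- ===== SOURCE A (Python) =====
-- from typing import List, Dict, Tuple, Optional, Any
--
-- def _find_page_segment(start_pos: int, page_segments: List[str]) -> int:
--     """Return page index for a given start position using pre-split page segments.
--     We reconstruct offsets by walking the segments in order.
--     Even indices are content; odd indices are the literal PageBreak tokens.
--     """
--     if start_pos is None or start_pos < 0:
--         return 0
--     pos = 0
--     page_idx = 0
--     for i, seg in enumerate(page_segments):
--         next_pos = pos + len(seg)
--         if start_pos < next_pos: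
--             # Number of page breaks encountered is the count of odd indices before i
--             page_idx = i // 2
--             return page_idx
--         pos = next_pos
--     # If beyond last, return last page
--     return max(0, (len(page_segments) - 1) // 2)
-- ===== SOURCE B (Python) =====
-- def _find_page_segment(start_pos, page_segments):
--     """Prefix-sum + binary search reformulation of the linear offset walk."""
--     if start_pos is None or start_pos < 0:
--         return 0
--     ends = []
--     total = 0
--     for seg in page_segments:
--         total += len(seg)
--         ends.append(total)
--     # binary search: first index lo with ends[lo] > start_pos (bisect_right by hand)
--     lo, hi = 0, len(ends)
--     while lo < hi:
--         mid = (lo + hi) // 2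
--         if ends[mid] <= start_pos:
--             lo = mid + 1
--         else:
--             hi = mid
--     if lo == len(ends):
--         return max(0, (len(page_segments) - 1) // 2)
--     return lo // 2
-- ===== Notes on version B (the rewrite author's own statement) =====
-- stated objective: alternative
-- what changed: Replaces the single linear walk carrying a running offset with building the prefix-sum array of segment end offsets once and binary-searching (hand-rolled bisect_right) for the first end exceeding start_pos.
import Mathlib
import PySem

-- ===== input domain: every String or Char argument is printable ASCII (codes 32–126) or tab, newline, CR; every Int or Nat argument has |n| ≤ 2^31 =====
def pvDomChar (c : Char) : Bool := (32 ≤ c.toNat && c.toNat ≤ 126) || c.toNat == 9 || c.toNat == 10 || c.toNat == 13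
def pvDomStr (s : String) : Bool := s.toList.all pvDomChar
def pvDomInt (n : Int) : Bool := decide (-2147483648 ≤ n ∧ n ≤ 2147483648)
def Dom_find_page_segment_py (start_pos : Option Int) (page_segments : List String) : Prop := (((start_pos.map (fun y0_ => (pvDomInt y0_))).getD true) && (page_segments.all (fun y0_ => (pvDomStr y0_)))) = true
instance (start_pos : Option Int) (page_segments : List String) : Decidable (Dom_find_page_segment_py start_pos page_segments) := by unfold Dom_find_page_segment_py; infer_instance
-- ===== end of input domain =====

-- B replaces A's linear offset walk by a prefix-sum array of segment end offsets plus a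
-- hand-rolled bisect_right binary search; same return value on every input (alternative, not faster).

-- ===== PORT A =====
-- the 'for i, seg in enumerate(page_segments)' loop with running offset pos; some = early return
def pvLoopA (x : Int) : List String → Nat → Int → Option Int
  | [], _, _ => none
  | seg :: rest, i, pos =>
    let next_pos := pos + (PySem.Str.len seg : Int)
    if x < next_pos then some ((i / 2 : Nat) : Int)
    else pvLoopA x rest (i + 1) next_pos

def find_page_segment_py (start_pos : Option Int) (page_segments : List String) : Int :=
  match start_pos with
  | none => 0
  | some x =>
    if x < 0 then 0
    else
      match pvLoopA x page_segments 0 0 with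
      | some r => r
      | none => max 0 (PySem.Int.floordiv ((page_segments.length : Int) - 1) 2)

-- ===== PORT B =====
-- ends.append(total) loop: prefix sums of segment lengths
def pvEnds : List String → Int → List Int
  | [], _ => []
  | seg :: rest, total => (total + (PySem.Str.len seg : Int)) :: pvEnds rest (total + (PySem.Str.len seg : Int))

-- the 'while lo < hi' binary search of Source B, step for step
-- (fuel = hi - lo bounds the iteration count; it only makes the loop structurally total)
def pvBisectGo (ends : List Int) (x : Int) : Nat → Nat → Nat → Nat
  | 0, lo, _ => lo
  | fuel + 1, lo, hi =>
    if lo < hi then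
      let mid := (lo + hi) / 2
      if ends.getD mid 0 ≤ x then pvBisectGo ends x fuel (mid + 1) hi
      else pvBisectGo ends x fuel lo mid
    else lo

def pvBisect (ends : List Int) (x : Int) (lo hi : Nat) : Nat :=
  pvBisectGo ends x (hi - lo) lo hi

def find_page_segment_py_alt (start_pos : Option Int) (page_segments : List String) : Int :=
  match start_pos with
  | none => 0
  | some x =>
    if x < 0 then 0
    else
      let ends := pvEnds page_segments 0
      let lo := pvBisect ends x 0 ends.length
      if lo = ends.length then max 0 (PySem.Int.floordiv ((page_segments.length : Int) - 1) 2)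
      else ((lo / 2 : Nat) : Int)

-- ===== PRECONDITION & SPEC =====
def Spec_find_page_segment_py (start_pos : Option Int) (page_segments : List String) (out : Int) : Prop := out = find_page_segment_py_alt start_pos page_segments
instance (start_pos : Option Int) (page_segments : List String) (out : Int) : Decidable (Spec_find_page_segment_py start_pos page_segments out) := by unfold Spec_find_page_segment_py; infer_instance

-- ===== CLAIM (what is proved, stated in full; the proofs are below) =====
def Claim_equal_find_page_segment_py : Prop := ∀ (start_pos : Option Int) (page_segments : List String), Dom_find_page_segment_py start_pos page_segments → Spec_find_page_segment_py start_pos page_segments (find_page_segment_py start_pos page_segments)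

-- ===== LEMMAS AND PROOFS =====

-- every entry of pvEnds segs t is ≥ t
theorem pvEnds_le (segs : List String) (t : Int) (k : Nat) (hk : k < (pvEnds segs t).length) :
    t ≤ (pvEnds segs t).getD k 0 := by
  induction segs generalizing t k with
  | nil => simp [pvEnds] at hk
  | cons s r ih =>
    cases k with
    | zero => simp [pvEnds]
    | succ k =>
      simp only [pvEnds, List.getD_cons_succ, List.length_cons] at hk ⊢
      have ha := ih (t + (PySem.Str.len s : Int)) k (by omega)
      have hb : (0:Int) ≤ PySem.Str.len s := by simp [PySem.Str.len_eq]
      omega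

-- pvEnds is nondecreasing
theorem pvEnds_mono (segs : List String) (t : Int) (j k : Nat) (hjk : j ≤ k)
    (hk : k < (pvEnds segs t).length) :
    (pvEnds segs t).getD j 0 ≤ (pvEnds segs t).getD k 0 := by
  induction segs generalizing t j k with
  | nil => simp [pvEnds] at hk
  | cons s r ih =>
    cases j with
    | zero =>
      cases k with
      | zero => exact le_refl _
      | succ k =>
        simp only [pvEnds, List.getD_cons_zero, List.getD_cons_succ, List.length_cons] at hk ⊢
        exact pvEnds_le r (t + (PySem.Str.len s : Int)) k (by omega)
    | succ j =>
      cases k with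
      | zero => omega
      | succ k =>
        simp only [pvEnds, List.getD_cons_succ, List.length_cons] at hk ⊢
        exact ih (t + (PySem.Str.len s : Int)) j k (by omega) (by omega)

-- binary-search correctness on a nondecreasing array
theorem pvBisect_spec (ends : List Int) (x : Int)
    (mono : ∀ j k, j ≤ k → k < ends.length → ends.getD j 0 ≤ ends.getD k 0)
    (lo hi : Nat) (hlo : lo ≤ hi) (hhi : hi ≤ ends.length)
    (h1 : ∀ k, k < lo → ends.getD k 0 ≤ x)
    (h2 : ∀ k, hi ≤ k → k < ends.length → x < ends.getD k 0) :
    lo ≤ pvBisect ends x lo hi ∧ pvBisect ends x lo hi ≤ hi ∧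
    (∀ k, k < pvBisect ends x lo hi → ends.getD k 0 ≤ x) ∧
    (∀ k, pvBisect ends x lo hi ≤ k → k < ends.length → x < ends.getD k 0) := by
  have main : ∀ (fuel lo hi : Nat), lo ≤ hi → hi ≤ ends.length → hi - lo ≤ fuel →
      (∀ k, k < lo → ends.getD k 0 ≤ x) →
      (∀ k, hi ≤ k → k < ends.length → x < ends.getD k 0) →
      lo ≤ pvBisectGo ends x fuel lo hi ∧ pvBisectGo ends x fuel lo hi ≤ hi ∧
      (∀ k, k < pvBisectGo ends x fuel lo hi → ends.getD k 0 ≤ x) ∧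
      (∀ k, pvBisectGo ends x fuel lo hi ≤ k → k < ends.length → x < ends.getD k 0) := by
    intro fuel
    induction fuel with
    | zero =>
      intro lo hi hlo' hhi' hf h1' h2'
      have : lo = hi := by omega
      subst this
      exact ⟨le_refl _, le_refl _, h1', h2'⟩
    | succ fuel ih =>
      intro lo hi hlo' hhi' hf h1' h2'
      by_cases h : lo < hi
      · rw [pvBisectGo, if_pos h]
        by_cases hc : ends.getD ((lo + hi) / 2) 0 ≤ x
        · rw [if_pos hc]
          have := ih ((lo + hi) / 2 + 1) hi (by omega) hhi' (by omega)
            (fun k hk => le_trans (mono k ((lo + hi) / 2) (by omega) (by omega)) hc) h2'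
          exact ⟨by omega, this.2.1, this.2.2.1, this.2.2.2⟩
        · rw [if_neg hc]
          have := ih lo ((lo + hi) / 2) (by omega) (by omega) (by omega) h1'
            (fun k hk hk' => lt_of_lt_of_le (lt_of_not_ge hc) (mono _ k hk hk'))
          exact ⟨this.1, by omega, this.2.2.1, this.2.2.2⟩
      · rw [pvBisectGo, if_neg h]
        have : lo = hi := by omega
        subst this
        exact ⟨le_refl _, le_refl _, h1', h2'⟩
  exact main (hi - lo) lo hi hlo hhi (le_refl _) h1 h2

-- A's loop returns (i + j)/2 for the first index j of pvEnds segs pos with x < entry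
theorem pvLoopA_eq (x : Int) (segs : List String) (i : Nat) (pos : Int) :
    pvLoopA x segs i pos =
      ((pvEnds segs pos).findIdx? (fun e => decide (x < e))).map (fun j => (((i + j) / 2 : Nat) : Int)) := by
  induction segs generalizing i pos with
  | nil => simp [pvLoopA, pvEnds]
  | cons s r ih =>
    by_cases h : x < pos + PySem.Str.len s
    · simp only [pvLoopA, pvEnds, List.findIdx?_cons]
      rw [if_pos h, if_pos (by simpa using h)]
      simp
    · simp only [pvLoopA, pvEnds, List.findIdx?_cons]
      rw [if_neg h, if_neg (by simpa using h), ih, Option.map_map]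
      cases (pvEnds r (pos + (PySem.Str.len s : Int))).findIdx? (fun e => decide (x < e)) with
      | none => rfl
      | some j =>
        simp only [Option.map_some, Function.comp_apply, Option.some.injEq, Int.natCast_inj]
        congr 1
        omega

theorem find_page_segment_py_spec : Claim_equal_find_page_segment_py := by
  intro start_pos page_segments _
  unfold Spec_find_page_segment_py find_page_segment_py find_page_segment_py_alt
  cases start_pos with
  | none => rfl
  | some x =>
    by_cases hx : x < 0
    · simp [hx]
    · simp only [if_neg hx]
      set ends := pvEnds page_segments 0 with hends
      have mono := fun j k hjk hk => pvEnds_mono page_segments 0 j k hjk hk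
      have hb := pvBisect_spec ends x mono 0 ends.length (Nat.zero_le _) (le_refl _)
        (fun k hk => absurd hk (Nat.not_lt_zero k)) (fun k hk hk' => absurd hk (by omega))
      set lo := pvBisect ends x 0 ends.length with hlo
      rw [pvLoopA_eq]
      by_cases h : lo = ends.length
      · -- no index satisfies the predicate, so findIdx? = none
        have hnone : ends.findIdx? (fun e => decide (x < e)) = none := by
          rw [List.findIdx?_eq_none_iff]
          intro e he
          obtain ⟨k, hk, hke⟩ := List.mem_iff_getElem.mp he
          have := hb.2.2.1 k (by omega)
          simp only [List.getD_eq_getElem?_getD, List.getElem?_eq_getElem hk, Option.getD_some] at this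
          simp [not_lt.mpr (hke ▸ this)]
        rw [hnone]
        simp [h]
      · -- lo < ends.length; findIdx? = some lo
        have hlt : lo < ends.length := lt_of_le_of_ne hb.2.1 h
        have hsome : ends.findIdx? (fun e => decide (x < e)) = some lo := by
          rw [List.findIdx?_eq_some_iff_getElem]
          refine ⟨hlt, ?_, ?_⟩
          · have := hb.2.2.2 lo (le_refl _) hlt
            simp only [List.getD_eq_getElem?_getD, List.getElem?_eq_getElem hlt, Option.getD_some] at this
            simpa using this
          · intro j hj
            have := hb.2.2.1 j hj
            have hjlt : j < ends.length := by omega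
            simp only [List.getD_eq_getElem?_getD, List.getElem?_eq_getElem hjlt, Option.getD_some] at this
            simpa using not_lt.mpr this
        rw [hsome]
        simp [h]
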